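-- pv_equiv track=rewrite | github.com/CZDanol/DNLTray | generator/index.py | genScopeCols
-- ===== SOURCE A (Python) =====
-- def genScopeCols(data):
-- 	keys = sorted(data.keys())
--
-- 	result = "| "
-- 	for key in keys:
-- 		result += data[key]["value"][0] + " | "
--
-- 	result += "\n| "
-- 	for key in keys:
-- 		result += "--- | "
--
-- 	rowCount = max(len(data[key]["value"]) for key in keys)
-- 	for row in range(1, rowCount):
-- 		vals = []
-- 		for key in keys:
-- 			lst = data[key]["value"]
-- 			vals.append(lst[row] if len(lst) > row else "")
--
-- 		if all(val == "" for val in vals):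
-- 			continue
--
-- 		result += "\n| "
--
-- 		for val in vals:
-- 			result += val
-- 			result += " | "
--
-- 	result += "\n\n"
--
-- 	return result
-- ===== SOURCE B (Python) =====
-- def _rows(cols):
-- 	# recursive transpose with '' padding: row of heads, then transpose of tails
-- 	if not any(cols):
-- 		return []
-- 	return [[c[0] if c else "" for c in cols]] + _rows([c[1:] for c in cols])
--
-- def genScopeCols(data):
-- 	cols = [data[k]["value"] for k in sorted(data)]
-- 	header, *body = _rows(cols)
-- 	lines = ["| " + " | ".join(header) + " | ",
-- 	         "| " + "--- | " * len(cols)]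
-- 	lines += ["| " + " | ".join(r) + " | " for r in body if any(r)]
-- 	return "\n".join(lines) + "\n\n"
-- ===== Notes on version B (the rewrite author's own statement) =====
-- stated objective: alternative
-- what changed: B transposes the sorted columns by structural recursion on column tails (a padded zip_longest with no indices, no rowCount and no max), takes the header as the transpose's first row and renders the remaining rows by filter + ' | '.join, while A iterates integer row indices 1..max(len) and grows one string with += in three per-key loops.
-- outside the precondition, e.g. on genScopeCols({}): A raises ValueError, B raises ValueError; on genScopeCols({'a': {'value': []}}): A raises IndexError, B raises ValueError; on genScopeCols({'a': {}}): A raises KeyError, B raises KeyError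
import Mathlib
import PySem

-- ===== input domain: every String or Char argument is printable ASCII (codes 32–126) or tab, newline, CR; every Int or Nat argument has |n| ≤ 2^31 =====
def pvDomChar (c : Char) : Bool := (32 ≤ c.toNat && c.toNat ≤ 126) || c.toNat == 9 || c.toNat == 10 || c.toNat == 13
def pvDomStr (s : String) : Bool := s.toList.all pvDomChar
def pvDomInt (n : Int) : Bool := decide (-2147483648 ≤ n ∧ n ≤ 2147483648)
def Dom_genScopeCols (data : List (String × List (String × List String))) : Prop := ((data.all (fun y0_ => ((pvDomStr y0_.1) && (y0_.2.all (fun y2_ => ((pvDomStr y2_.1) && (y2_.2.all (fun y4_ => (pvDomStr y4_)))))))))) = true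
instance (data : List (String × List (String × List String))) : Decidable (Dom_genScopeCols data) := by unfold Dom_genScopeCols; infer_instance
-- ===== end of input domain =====

-- B transposes the sorted columns by structural recursion on their tails (no indices, no
-- rowCount/max), takes the header as the transpose's first row and renders the remaining
-- rows by filter + join; A grows one string with += over index loops (alternative, same cost).

-- ===== PORT A =====
-- data[key]["value"]  (dict lookups; default [] is never used inside Pre_)
def aVal (data : List (String × List (String × List String))) (key : String) : List String :=
  PySem.Dict.getD (PySem.Dict.ofList ((PySem.Dict.ofList data).getD key [])) "value" []

def genScopeCols (data : List (String × List (String × List String))) : String :=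
  let keys := PySem.List.sorted (PySem.Dict.keys (PySem.Dict.ofList data)) (fun k => k) false
  -- result = "| "; for key in keys: result += data[key]["value"][0] + " | "
  let result := keys.foldl (fun r key => r ++ PySem.List.pyGetD (aVal data key) 0 "" ++ " | ") "| "
  -- result += "\n| "; for key in keys: result += "--- | "
  let result := keys.foldl (fun r _ => r ++ "--- | ") (result ++ "\n| ")
  -- rowCount = max(len(data[key]["value"]) for key in keys)  (ValueError on empty keys: outside Pre_)
  let rowCount := (PySem.List.max? (keys.map (fun key => PySem.List.len (aVal data key))) (fun x => x)).getD 1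
  -- for row in range(1, rowCount): …
  let result := (PySem.List.pyRange 1 rowCount 1).foldl (fun r row =>
      let vals := keys.map (fun key =>
        let lst := aVal data key
        if PySem.List.len lst > row then PySem.List.pyGetD lst row "" else "")
      if vals.all (fun v => v == "") then r
      else vals.foldl (fun r v => r ++ v ++ " | ") (r ++ "\n| ")) result
  result ++ "\n\n"

-- ===== PORT B =====
def bVal (data : List (String × List (String × List String))) (key : String) : List String :=
  PySem.Dict.getD (PySem.Dict.ofList ((PySem.Dict.ofList data).getD key [])) "value" []

-- exact port of Python's '"--- | " * n' (string repetition by left-to-right concatenation)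
def bRepeat (s : String) : Nat → String
  | 0 => ""
  | n + 1 => s ++ bRepeat s n

-- termination measure for the recursive transpose: total number of remaining cells
theorem sum_tail_le (cols : List (List String)) :
    ((cols.map List.tail).map List.length).sum ≤ (cols.map List.length).sum := by
  induction cols with
  | nil => simp
  | cons c cols ih =>
    have : c.tail.length ≤ c.length := by cases c <;> simp
    simp only [List.map_cons, List.sum_cons]
    omega

theorem bRows_dec (cols : List (List String)) (h : cols.any (fun c => !c.isEmpty)) :
    ((cols.map List.tail).map List.length).sum < (cols.map List.length).sum := by
  induction cols with
  | nil => simp at h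
  | cons c cols ih =>
    simp only [List.any_cons, Bool.or_eq_true] at h
    simp only [List.map_cons, List.sum_cons]
    rcases h with h | h
    · have hc : c ≠ [] := by cases c <;> simp_all
      have h1 : c.tail.length < c.length := by cases c with | nil => simp_all | cons x t => simp
      have h2 := sum_tail_le cols
      omega
    · have h1 := ih h
      have h2 : c.tail.length ≤ c.length := by cases c <;> simp
      omega

-- _rows(cols): recursive transpose with '' padding
def bRows (cols : List (List String)) : List (List String) :=
  if h : cols.any (fun c => !c.isEmpty) then
    (cols.map (fun c => match c with | [] => "" | x :: _ => x)) :: bRows (cols.map List.tail)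
  else []
termination_by (cols.map List.length).sum
decreasing_by simpa using bRows_dec cols h

def genScopeCols_alt (data : List (String × List (String × List String))) : String :=
  let keys := PySem.List.sorted (PySem.Dict.keys (PySem.Dict.ofList data)) (fun k => k) false
  let cols := keys.map (fun k => bVal data k)
  match bRows cols with
  | [] => ""  -- Python raises ValueError unpacking 'header, *body' here; outside Pre_
  | header :: body =>
    let lines := ["| " ++ PySem.Str.join " | " header ++ " | ",
                  "| " ++ bRepeat "--- | " cols.length]
      ++ (body.filter (fun r => r.any (fun c => !(c == "")))).map
           (fun r => "| " ++ PySem.Str.join " | " r ++ " | ")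
    PySem.Str.join "\n" lines ++ "\n\n"

-- ===== PRECONDITION & SPEC =====
-- Pre_ excludes exactly the inputs where A raises: empty data (ValueError in max), a key whose
-- dict lacks "value" (KeyError), or an empty "value" list (IndexError in the header row).
def Pre_genScopeCols (data : List (String × List (String × List String))) : Prop :=
  (PySem.Dict.ofList data).items ≠ [] ∧ ∀ p ∈ (PySem.Dict.ofList data).items, PySem.Dict.getD (PySem.Dict.ofList p.2) "value" ([] : List String) ≠ []
instance (data : List (String × List (String × List String))) : Decidable (Pre_genScopeCols data) := by unfold Pre_genScopeCols; infer_instance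

def pvWitness_genScopeCols : (List (String × List (String × List String))) :=
  [("b", [("value", ["Head B", "x"])]), ("a", [("value", ["Head A"])])]

def Spec_genScopeCols (data : List (String × List (String × List String))) (out : String) : Prop := out = genScopeCols_alt data
instance (data : List (String × List (String × List String))) (out : String) : Decidable (Spec_genScopeCols data out) := by unfold Spec_genScopeCols; infer_instance

-- ===== CLAIM (what is proved, stated in full; the proofs are below) =====
def Claim_equal_genScopeCols : Prop := ∀ (data : List (String × List (String × List String))), Dom_genScopeCols data → Pre_genScopeCols data → Spec_genScopeCols data (genScopeCols data)

-- ===== LEMMAS AND PROOFS =====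

-- concatenation of a list of strings (proof-side abbreviation)
def sCat : List String → String
  | [] => ""
  | x :: l => x ++ sCat l

theorem join_bar_cons (v : String) (t : List String) :
    PySem.Str.join " | " (v :: t) = v ++ (sCat (t.map (fun w => " | " ++ w))) := by
  induction t generalizing v with
  | nil =>
    apply String.toList_inj.mp
    simp [PySem.Str.join, PySem.Chars.join_singleton, sCat]
  | cons w t ih =>
    apply String.toList_inj.mp
    have h := congrArg String.toList (ih w)
    simp [PySem.Str.join, PySem.Chars.join_cons_cons] at h ⊢
    simp [sCat, h]

theorem foldl_bar (t : List String) : ∀ (v r : String),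
    (v :: t).foldl (fun r v => r ++ v ++ " | ") r = r ++ PySem.Str.join " | " (v :: t) ++ " | " := by
  induction t with
  | nil =>
    intro v r
    simp [List.foldl, join_bar_cons, sCat, String.append_assoc]
  | cons w t ih =>
    intro v r
    have h := ih w (r ++ v ++ " | ")
    simp only [List.foldl_cons] at h ⊢
    rw [h]
    rw [join_bar_cons v (w :: t), join_bar_cons w t]
    apply String.toList_inj.mp
    simp [sCat]

theorem foldl_sep {α : Type} (l : List α) : ∀ (r : String),
    l.foldl (fun r _ => r ++ "--- | ") r = r ++ bRepeat "--- | " l.length := by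
  induction l with
  | nil => intro r; simp [bRepeat, String.append_empty]
  | cons x t ih =>
    intro r
    simp only [List.foldl_cons, List.length_cons]
    rw [ih]
    show (r ++ "--- | ") ++ bRepeat "--- | " t.length = r ++ ("--- | " ++ bRepeat "--- | " t.length)
    exact String.append_assoc

theorem any_ne_empty (l : List String) :
    (l.any (fun c => !(c == ""))) = !(l.all (fun v => v == "")) := by
  induction l with
  | nil => rfl
  | cons x t ih => by_cases h : x = "" <;> simp [h, ih]

theorem foldl_rows (L : List Int) (g : Int → List String) (hg : ∀ row, g row ≠ []) :
    ∀ (r : String),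
    L.foldl (fun r row =>
        if (g row).all (fun v => v == "") then r
        else (g row).foldl (fun r v => r ++ v ++ " | ") (r ++ "\n| ")) r
      = r ++ sCat ((L.filter (fun row => (g row).any (fun c => !(c == "")))).map
          (fun row => "\n| " ++ PySem.Str.join " | " (g row) ++ " | ")) := by
  induction L with
  | nil => intro r; simp [sCat, String.append_empty]
  | cons row L ih =>
    intro r
    simp only [List.foldl_cons, List.filter_cons]
    by_cases h : ((g row).all (fun v => v == "")) = true
    · rw [if_pos h, ih r]
      have hb : ((g row).any (fun c => !(c == ""))) = false := by
        rw [any_ne_empty, h]; rfl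
      rw [if_neg (by simp [hb])]
    · rw [if_neg h]
      obtain ⟨v, t, hvt⟩ : ∃ v t, g row = v :: t := by
        cases hgr : g row with
        | nil => exact absurd hgr (hg row)
        | cons v t => exact ⟨v, t, rfl⟩
      rw [hvt, foldl_bar, ← hvt, ih]
      have hb : ((g row).any (fun c => !(c == ""))) = true := by
        rw [any_ne_empty]; simp [h]
      rw [if_pos hb]
      simp only [List.map_cons, sCat]
      apply String.toList_inj.mp
      simp

theorem join_nl (bl : List String) : ∀ (h s : String),
    PySem.Str.join "\n" (h :: s :: bl) = h ++ "\n" ++ s ++ sCat (bl.map (fun l => "\n" ++ l)) := by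
  induction bl with
  | nil =>
    intro h s
    apply String.toList_inj.mp
    simp [PySem.Str.join, PySem.Chars.join_cons_cons, PySem.Chars.join_singleton, sCat]
  | cons x bl ih =>
    intro h s
    have h1 := congrArg String.toList (ih s x)
    apply String.toList_inj.mp
    simp [PySem.Str.join, PySem.Chars.join_cons_cons] at h1 ⊢
    simp [sCat, h1]

theorem keys_sorted_ne_nil (data : List (String × List (String × List String)))
    (h : (PySem.Dict.ofList data).items ≠ []) :
    PySem.List.sorted (PySem.Dict.keys (PySem.Dict.ofList data)) (fun k => k) false ≠ [] := by
  intro hc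
  have hperm := PySem.List.sorted_perm (PySem.Dict.keys (PySem.Dict.ofList data)) (fun k : String => k) false
  rw [hc] at hperm
  have : PySem.Dict.keys (PySem.Dict.ofList data) = [] := hperm.symm.eq_nil
  apply h
  have := congrArg List.length this
  simp only [PySem.Dict.keys, List.length_map, List.length_nil] at this
  exact List.eq_nil_of_length_eq_zero this

theorem foldl_bar_map {α : Type} (f : α → String) (k0 : α) (kt : List α) (r : String) :
    (k0 :: kt).foldl (fun r key => r ++ f key ++ " | ") r
      = r ++ PySem.Str.join " | " ((k0 :: kt).map f) ++ " | " := by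
  rw [← List.foldl_map (f := f) (g := fun r v => r ++ v ++ " | "), List.map_cons, foldl_bar]

-- ===== lemmas about the recursive transpose bRows =====

-- max column length, the number of rows the transpose yields
def maxLen (cols : List (List String)) : Nat := (cols.map List.length).foldr max 0

theorem getD_tail (c : List String) (i : Nat) : c.tail.getD i "" = c.getD (i + 1) "" := by
  cases c <;> simp [List.getD]

theorem maxLen_tail (cols : List (List String)) : maxLen (cols.map List.tail) = maxLen cols - 1 := by
  induction cols with
  | nil => simp [maxLen]
  | cons c cols ih =>
    simp only [maxLen, List.map_cons, List.foldr_cons] at ih ⊢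
    cases c <;> simp_all <;> omega

theorem maxLen_eq_zero (cols : List (List String)) (h : (cols.any (fun c => !c.isEmpty)) = false) :
    maxLen cols = 0 := by
  induction cols with
  | nil => rfl
  | cons c cols ih =>
    simp only [List.any_cons, Bool.or_eq_false_iff] at h
    obtain ⟨h1, h2⟩ := h
    have hc : c = [] := by cases c <;> simp_all
    have := ih h2
    subst hc
    simp only [maxLen, List.map_cons, List.foldr_cons, List.length_nil] at this ⊢
    omega

theorem maxLen_pos (cols : List (List String)) (h : (cols.any (fun c => !c.isEmpty)) = true) :
    0 < maxLen cols := by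
  induction cols with
  | nil => simp at h
  | cons c cols ih =>
    simp only [List.any_cons, Bool.or_eq_true] at h
    simp only [maxLen, List.map_cons, List.foldr_cons]
    rcases h with h | h
    · have : c ≠ [] := by cases c <;> simp_all
      have : 0 < c.length := List.length_pos_of_ne_nil this
      omega
    · have := ih h
      simp only [maxLen] at this
      omega

theorem bRows_eq_aux (n : Nat) : ∀ cols : List (List String), (cols.map List.length).sum ≤ n →
    bRows cols = (List.range (maxLen cols)).map (fun i => cols.map (fun c => c.getD i "")) := by
  induction n with
  | zero =>
    intro cols hs
    have hany : (cols.any (fun c => !c.isEmpty)) = false := by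
      by_contra hc
      have := bRows_dec cols (by revert hc; cases cols.any (fun c => !c.isEmpty) <;> simp)
      omega
    rw [bRows, dif_neg (by simp [hany]), maxLen_eq_zero cols hany]
    rfl
  | succ n ih =>
    intro cols hs
    by_cases hany : (cols.any (fun c => !c.isEmpty)) = true
    · rw [bRows, dif_pos hany]
      have hpos := maxLen_pos cols hany
      obtain ⟨m, hm⟩ : ∃ m, maxLen cols = m + 1 := ⟨maxLen cols - 1, by omega⟩
      have hdec := bRows_dec cols hany
      have htails := ih (cols.map List.tail) (by omega)
      rw [hm, List.range_succ_eq_map, List.map_cons, List.map_map]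
      congr 1
      · apply List.map_congr_left; intro c _; cases c <;> simp [List.getD]
      · have heq : bRows (List.map (fun x => x.tail) cols) = bRows (cols.map List.tail) := rfl
        rw [heq, htails, maxLen_tail, hm]
        simp only [Nat.add_sub_cancel, List.map_map, Function.comp_def]
        apply List.map_congr_left
        intro i _
        apply List.map_congr_left
        intro c _
        exact getD_tail c i
    · rw [bRows, dif_neg hany,
          maxLen_eq_zero cols (by revert hany; cases cols.any (fun c => !c.isEmpty) <;> simp)]
      rfl

theorem bRows_eq (cols : List (List String)) :
    bRows cols = (List.range (maxLen cols)).map (fun i => cols.map (fun c => c.getD i "")) :=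
  bRows_eq_aux _ cols le_rfl

-- A's cell expression collapses to getD at a nonnegative index
theorem cell_eq (c : List String) (k : Nat) :
    (if PySem.List.len c > (1 + (k : Int)) then PySem.List.pyGetD c (1 + (k : Int)) "" else "")
      = c.getD (k + 1) "" := by
  have hcast : (1 + (k : Int)) = ((k + 1 : Nat) : Int) := by push_cast; ring
  rw [hcast, PySem.List.pyGetD_natCast]
  by_cases h : PySem.List.len c > ((k + 1 : Nat) : Int)
  · rw [if_pos h]
  · rw [if_neg h]
    have : c.length ≤ k + 1 := by
      simp only [PySem.List.len_eq, gt_iff_lt, not_lt] at h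
      exact_mod_cast h
    rw [List.getD_eq_default _ _ this]

theorem foldr_max_zero' (a : Nat) (t : List Nat) : t.foldr max a = max a (t.foldr max 0) := by
  induction t with
  | nil => simp
  | cons b t ih => simp only [List.foldr_cons, ih]; omega

-- foldl max over Int casts of Nat lengths equals the cast of foldr max 0 (nonempty list)
theorem foldl_max_cast (t : List Nat) : ∀ (a : Nat),
    (t.map (Nat.cast : Nat → Int)).foldl max (a : Int) = ((t.foldr max a : Nat) : Int) := by
  induction t with
  | nil => intro a; rfl
  | cons b t ih =>
    intro a
    rw [List.map_cons, List.foldl_cons, ← Nat.cast_max, ih, List.foldr_cons]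
    congr 1
    rw [foldr_max_zero' (max a b) t, foldr_max_zero' a t]
    omega

theorem le_foldr_max (l : List Nat) (x : Nat) (h : x ∈ l) : x ≤ l.foldr max 0 := by
  induction l with
  | nil => simp at h
  | cons a t ih =>
    simp only [List.mem_cons] at h
    simp only [List.foldr_cons]
    rcases h with rfl | h
    · omega
    · have := ih h; omega

-- ===== VERDICT (by name: the statement is the Claim_ definition above) =====
theorem genScopeCols_spec : Claim_equal_genScopeCols := by
  intro data _ hpre
  obtain ⟨hne, hvals⟩ := hpre
  unfold Spec_genScopeCols genScopeCols genScopeCols_alt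
  have hval : bVal = aVal := rfl
  rw [hval]
  set keys := PySem.List.sorted (PySem.Dict.keys (PySem.Dict.ofList data)) (fun k => k) false with hkeys
  have hk : keys ≠ [] := keys_sorted_ne_nil data hne
  obtain ⟨k0, kt, hkk⟩ : ∃ k0 kt, keys = k0 :: kt := by
    cases h : keys with
    | nil => exact absurd h hk
    | cons a b => exact ⟨a, b, rfl⟩
  -- every column is nonempty
  have hcol : ∀ k ∈ keys, aVal data k ≠ [] := by
    intro k hkmem
    have hmem : k ∈ PySem.Dict.keys (PySem.Dict.ofList data) := by
      have hperm := PySem.List.sorted_perm (PySem.Dict.keys (PySem.Dict.ofList data)) (fun k : String => k) false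
      exact hperm.mem_iff.mp (hkeys ▸ hkmem)
    simp only [PySem.Dict.keys, List.mem_map] at hmem
    obtain ⟨p, hp, hpk⟩ := hmem
    have hv := hvals p hp
    unfold aVal
    rw [← hpk]
    rw [PySem.Dict.getD_of_mem_items _ (show (p.1, p.2) ∈ (PySem.Dict.ofList data).items from by simpa using hp) (PySem.Dict.nodup_keys_ofList data)]
    exact hv
  -- the columns
  set cols := keys.map (fun k => aVal data k) with hcols
  have hcols_ne : ∀ c ∈ cols, c ≠ [] := by
    intro c hc
    rw [hcols] at hc
    obtain ⟨k, hkmem, rfl⟩ := List.mem_map.mp hc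
    exact hcol k hkmem
  -- N = max column length, ≥ 1
  set N := maxLen cols with hN
  have hN1 : 1 ≤ N := by
    have h0 : (aVal data k0).length ∈ cols.map List.length := by
      rw [hcols, hkk]
      exact List.mem_map_of_mem (List.mem_map_of_mem (by simp))
    have h1 := le_foldr_max _ _ h0
    have h2 : 1 ≤ (aVal data k0).length :=
      List.length_pos_of_ne_nil (hcol k0 (by rw [hkk]; simp))
    rw [hN]
    unfold maxLen
    omega
  -- rowCount = ↑N
  have hrc : (PySem.List.max? (keys.map (fun key => PySem.List.len (aVal data key))) (fun x => x)).getD 1 = (N : Int) := by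
    rw [hkk, List.map_cons, PySem.List.max?_id_cons, Option.getD_some]
    have hmapcast : kt.map (fun key => PySem.List.len (aVal data key))
        = (kt.map (fun key => (aVal data key).length)).map (Nat.cast : Nat → Int) := by
      simp [PySem.List.len_eq]
    rw [hmapcast, show PySem.List.len (aVal data k0) = ((aVal data k0).length : Int) from PySem.List.len_eq _,
        foldl_max_cast]
    congr 1
    rw [foldr_max_zero']
    have : N = max (aVal data k0).length (((kt.map (fun k => aVal data k)).map List.length).foldr max 0) := by
      rw [hN, hcols, hkk]; simp [maxLen]
    rw [this, List.map_map]
    rfl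
  -- A's row contents
  have hg : ∀ k : Nat, (keys.map (fun key =>
        if PySem.List.len (aVal data key) > (1 + (k : Int)) then PySem.List.pyGetD (aVal data key) (1 + (k : Int)) "" else ""))
      = cols.map (fun c => c.getD (k + 1) "") := by
    intro k
    rw [hcols, List.map_map]
    apply List.map_congr_left
    intro key _
    exact cell_eq (aVal data key) k
  rw [hkk] at hg
  dsimp only
  rw [hrc]
  -- B side: expose the transpose as indexed rows
  obtain ⟨m, hm⟩ : ∃ m, N = m + 1 := ⟨N - 1, by omega⟩
  have hbrows : bRows cols = (cols.map (fun c => c.getD 0 ""))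
      :: (List.range m).map (fun i => cols.map (fun c => c.getD (i + 1) "")) := by
    rw [bRows_eq cols, ← hN, hm, List.range_succ_eq_map, List.map_cons, List.map_map, List.map_map]
    rfl
  rw [hbrows]
  rw [hkk]
  rw [foldl_bar_map (f := fun key => PySem.List.pyGetD (aVal data key) 0 "")]
  rw [foldl_sep]
  rw [foldl_rows _ _ (by intro row; simp)]
  dsimp only
  have hhd : List.map (fun key => PySem.List.pyGetD (aVal data key) 0 "") (k0 :: kt)
      = cols.map (fun c => c.getD 0 "") := by
    rw [hcols, hkk, List.map_map]
    exact List.map_congr_left fun k _ => PySem.List.pyGetD_zero _ _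
  have hNm : ((N : Int) - 1).toNat = m := by omega
  have hrange : PySem.List.pyRange 1 (N : Int) 1 = (List.range m).map (fun i : Nat => 1 + (i : Int)) := by
    rw [PySem.List.pyRange_one, hNm]
  rw [hhd, hrange, List.filter_map, List.map_map]
  simp only [List.cons_append, List.nil_append, List.length_map]
  rw [join_nl, List.filter_map, List.map_map, List.map_map, List.map_map]
  simp only [Function.comp_def, hg]
  have hfun : ∀ x : String, "\n| " ++ x ++ " | " = "\n" ++ ("| " ++ x ++ " | ") := by
    intro x
    apply String.toList_inj.mp
    simp
  simp only [hfun]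
  apply String.toList_inj.mp
  simp [String.append_assoc]
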